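-- pv_equiv track=rewrite | github.com/Fmtomiozzo/AyED2025c2-Tomiozzo-oficial | Trabajopractico_2/Trabajo_6/modules/grafos.py | enraizar_mst
-- ===== SOURCE A (Python) =====
-- from collections import defaultdict, deque
--
-- def enraizar_mst(mst, raiz):
--     """
--     A partir de la lista de aristas del MST, construye:
--
--       - parent: dict nodo -> (padre, peso_a_padre)
--       - children: dict nodo -> lista[(hijo, peso)]
--       - N: conjunto de nodos del MST
--     """
--     g = defaultdict(list)
--     N = set()
--     for u, v, w in mst:
--         g[u].append((v, w))
--         g[v].append((u, w))
--         N.add(u)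
--         N.add(v)
--
--     parent = {n: (None, 0) for n in N}
--     children = {n: [] for n in N}
--
--     if raiz in N:
--         from collections import deque
--
--         vis = {raiz}
--         q = deque([raiz])
--         while q:
--             u = q.popleft()
--             for v, w in g[u]:
--                 if v not in vis:
--                     vis.add(v)
--                     parent[v] = (u, w)
--                     children[u].append((v, w))
--                     q.append(v)
--     else:
--         # Caso borde: si el MST está vacío o no incluye la raíz
--         N.add(raiz)
--         parent[raiz] = (None, 0)
--         children.setdefault(raiz, [])
--
--     for k in children:
--         children[k].sort(key=lambda x: x[0])
--
--     return parent, children, N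
-- ===== SOURCE B (Python) =====
-- from collections import defaultdict
--
-- def enraizar_mst(mst, raiz):
--     """
--     Level-synchronous BFS (plain frontier lists, no deque) that records only
--     the parent links; the children map is then defined directly as a dict
--     comprehension over the parent map, each list sorted by child id.
--     """
--     g = defaultdict(list)
--     N = set()
--     for u, v, w in mst:
--         g[u].append((v, w))
--         g[v].append((u, w))
--         N.add(u)
--         N.add(v)
--
--     parent = {n: (None, 0) for n in N}
--
--     if raiz in N:
--         vis = {raiz}
--         frontier = [raiz]
--         while frontier:
--             nxt = []
--             for u in frontier:
--                 for v, w in g[u]: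
--                     if v not in vis:
--                         vis.add(v)
--                         parent[v] = (u, w)
--                         nxt.append(v)
--             frontier = nxt
--     else:
--         N.add(raiz)
--         parent[raiz] = (None, 0)
--
--     children = {n: sorted(((c, w) for c, (p, w) in parent.items() if p == n),
--                           key=lambda x: x[0])
--                 for n in N}
--     return parent, children, N
-- ===== Notes on version B (the rewrite author's own statement) =====
-- stated objective: alternative
-- what changed: Replaces the deque-driven BFS that mutates a children map in-flight by a level-synchronous BFS over plain frontier lists recording only parent links, with the children map defined afterwards as a dict comprehension filtering the parent map (no deque, no in-loop children appends, no per-key sort loop).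
import Mathlib
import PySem

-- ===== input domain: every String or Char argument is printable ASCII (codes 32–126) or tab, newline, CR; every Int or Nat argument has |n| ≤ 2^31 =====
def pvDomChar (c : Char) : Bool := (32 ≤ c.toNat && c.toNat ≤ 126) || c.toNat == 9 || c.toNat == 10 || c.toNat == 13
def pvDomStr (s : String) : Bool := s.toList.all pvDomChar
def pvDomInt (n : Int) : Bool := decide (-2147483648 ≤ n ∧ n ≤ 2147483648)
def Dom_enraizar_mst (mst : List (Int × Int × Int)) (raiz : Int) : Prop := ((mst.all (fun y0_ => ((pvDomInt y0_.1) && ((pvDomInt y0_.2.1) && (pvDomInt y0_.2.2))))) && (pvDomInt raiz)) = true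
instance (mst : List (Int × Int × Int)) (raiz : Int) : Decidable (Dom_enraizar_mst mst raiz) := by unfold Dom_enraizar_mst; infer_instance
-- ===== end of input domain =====

-- B replaces A's deque-driven BFS that grows the children map in-flight by a
-- level-synchronous BFS over plain frontier lists recording only parent links;
-- the children map is then defined as a comprehension filtering the parent map
-- (objective: alternative, not faster). Python's dict/set iteration (hash) order
-- is not modelled: dict and set OUTPUTS are compared ignoring order, and every
-- returned list VALUE is sorted, so no result component depends on that order.
-- Each Python loop ('while q' / 'while frontier') is ported with fuel
-- 2*len(mst)+1, which exceeds the number of iterations either loop can perform.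

-- ===== PORT A =====

-- 'g = defaultdict(list); N = set(); for u,v,w in mst: g[u].append((v,w)); g[v].append((u,w)); N.add(u); N.add(v)'
-- (shared verbatim by Source B, so this helper serves both ports)
def pvBuild (mst : List (Int × Int × Int)) :
    PySem.Dict Int (List (Int × Int)) × PySem.Set Int :=
  mst.foldl
    (fun s e =>
      (((s.1.modify e.1 [] (· ++ [(e.2.1, e.2.2)])).modify e.2.1 [] (· ++ [(e.1, e.2.2)])),
       PySem.Set.add (PySem.Set.add s.2 e.1) e.2.1))
    (PySem.Dict.empty, PySem.Set.empty)

-- 'parent = {n: (None, 0) for n in N}'  (also shared verbatim by Source B)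
def pvInitParent (N : List Int) : PySem.Dict Int (Option Int × Int) :=
  N.foldl (fun d n => d.insert n (none, 0)) PySem.Dict.empty

-- 'children = {n: [] for n in N}'  (A only)
def pvInitChildren (N : List Int) : PySem.Dict Int (List (Int × Int)) :=
  N.foldl (fun d n => d.insert n []) PySem.Dict.empty

-- A's final loop: 'for k in children: children[k].sort(key=lambda x: x[0])'
def pvSortVals (d : PySem.Dict Int (List (Int × Int))) : PySem.Dict Int (List (Int × Int)) :=
  PySem.Dict.mk (d.items.map (fun p => (p.1, PySem.List.sorted p.2 (fun x => x.1))))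

-- A's BFS: 'while q: u = q.popleft(); for v,w in g[u]: if v not in vis: vis.add(v);
-- parent[v] = (u,w); children[u].append((v,w)); q.append(v)'
-- (children[u].append is ported as modify; u is always a key, so no KeyError arises)
def pvBfsA (g : PySem.Dict Int (List (Int × Int))) :
    Nat → PySem.Set Int → PySem.Dict Int (Option Int × Int) →
    PySem.Dict Int (List (Int × Int)) → List Int →
    PySem.Dict Int (Option Int × Int) × PySem.Dict Int (List (Int × Int))
  | 0, _, par, ch, _ => (par, ch)
  | Nat.succ fuel, vis, par, ch, q =>
    match q with
    | [] => (par, ch)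
    | u :: rest =>
      let s := (g.getD u []).foldl
        (fun (s : PySem.Set Int × PySem.Dict Int (Option Int × Int) ×
                  PySem.Dict Int (List (Int × Int)) × List Int) vw =>
          if PySem.Set.contains s.1 vw.1 then s
          else (PySem.Set.add s.1 vw.1, s.2.1.insert vw.1 (some u, vw.2),
                s.2.2.1.modify u [] (· ++ [(vw.1, vw.2)]), s.2.2.2 ++ [vw.1]))
        (vis, par, ch, rest)
      pvBfsA g fuel s.1 s.2.1 s.2.2.1 s.2.2.2

def enraizar_mst (mst : List (Int × Int × Int)) (raiz : Int) :
    (List (Int × Option Int × Int)) × (List (Int × List (Int × Int))) × List Int :=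
  let b := pvBuild mst
  let parent := pvInitParent b.2
  let children := pvInitChildren b.2
  if PySem.Set.contains b.2 raiz then
    let r := pvBfsA b.1 (2 * mst.length + 1) (PySem.Set.add PySem.Set.empty raiz)
               parent children [raiz]
    (r.1.items, (pvSortVals r.2).items, b.2)
  else
    ((parent.insert raiz (none, 0)).items,
     (pvSortVals (children.setdefault raiz [])).items,
     PySem.Set.add b.2 raiz)

-- ===== PORT B =====

-- B's inner loop over one frontier node: 'for v, w in g[u]: if v not in vis:
-- vis.add(v); parent[v] = (u, w); nxt.append(v)' (state = (vis, parent, nxt))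
def pvStepB (g : PySem.Dict Int (List (Int × Int))) (u : Int)
    (s : PySem.Set Int × PySem.Dict Int (Option Int × Int) × List Int) :
    PySem.Set Int × PySem.Dict Int (Option Int × Int) × List Int :=
  (g.getD u []).foldl
    (fun (s : PySem.Set Int × PySem.Dict Int (Option Int × Int) × List Int) vw =>
      if PySem.Set.contains s.1 vw.1 then s
      else (PySem.Set.add s.1 vw.1, s.2.1.insert vw.1 (some u, vw.2), s.2.2 ++ [vw.1]))
    s

-- B's level loop: 'while frontier: nxt = []; for u in frontier: …; frontier = nxt'
def pvLevel (g : PySem.Dict Int (List (Int × Int))) :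
    Nat → PySem.Set Int → PySem.Dict Int (Option Int × Int) → List Int →
    PySem.Dict Int (Option Int × Int)
  | 0, _, par, _ => par
  | Nat.succ fuel, vis, par, front =>
    match front with
    | [] => par
    | _ :: _ =>
      let r := front.foldl (fun s u => pvStepB g u s) (vis, par, ([] : List Int))
      pvLevel g fuel r.1 r.2.1 r.2.2

-- B's comprehension: 'children = {n: sorted(((c, w) for c, (p, w) in parent.items()
--                                 if p == n), key=lambda x: x[0]) for n in N}'
def pvChildrenOf (par : PySem.Dict Int (Option Int × Int)) (N : List Int) :
    PySem.Dict Int (List (Int × Int)) :=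
  N.foldl
    (fun d n =>
      d.insert n (PySem.List.sorted
        (par.items.filterMap (fun it =>
          if it.2.1 == some n then some (it.1, it.2.2) else none))
        (fun x => x.1)))
    PySem.Dict.empty

def enraizar_mst_alt (mst : List (Int × Int × Int)) (raiz : Int) :
    (List (Int × Option Int × Int)) × (List (Int × List (Int × Int))) × List Int :=
  let b := pvBuild mst
  let parent := pvInitParent b.2
  if PySem.Set.contains b.2 raiz then
    let par := pvLevel b.1 (2 * mst.length + 1) (PySem.Set.add PySem.Set.empty raiz)
                 parent [raiz]
    (par.items, (pvChildrenOf par b.2).items, b.2)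
  else
    let N' := PySem.Set.add b.2 raiz
    let par := parent.insert raiz (none, 0)
    (par.items, (pvChildrenOf par N').items, N')

-- ===== PRECONDITION & SPEC =====
def Spec_enraizar_mst (mst : List (Int × Int × Int)) (raiz : Int) (out : (List (Int × Option Int × Int)) × (List (Int × List (Int × Int))) × List Int) : Prop := out = enraizar_mst_alt mst raiz
instance (mst : List (Int × Int × Int)) (raiz : Int) (out : (List (Int × Option Int × Int)) × (List (Int × List (Int × Int))) × List Int) : Decidable (Spec_enraizar_mst mst raiz out) := by unfold Spec_enraizar_mst; infer_instance

-- ===== CLAIM (what is proved, stated in full; the proofs are below) =====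
def Claim_equal_enraizar_mst : Prop := ∀ (mst : List (Int × Int × Int)) (raiz : Int), Dom_enraizar_mst mst raiz → Spec_enraizar_mst mst raiz (enraizar_mst mst raiz)

-- ===== LEMMAS AND PROOFS =====

-- Proof-only deque BFS on the (vis, parent, queue) state: the bridge between
-- A's deque BFS (of which it is the children-forgetting projection) and B's
-- level-synchronous BFS (which consumes it frontier-block by frontier-block).
def pvBfsP (g : PySem.Dict Int (List (Int × Int))) :
    Nat → (PySem.Set Int × PySem.Dict Int (Option Int × Int) × List Int) →
    (PySem.Set Int × PySem.Dict Int (Option Int × Int) × List Int)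
  | 0, s => s
  | Nat.succ fuel, (vis, par, q) =>
    match q with
    | [] => (vis, par, [])
    | u :: rest => pvBfsP g fuel (pvStepB g u (vis, par, rest))

theorem pvBfsP_nil (g : PySem.Dict Int (List (Int × Int))) (fuel : Nat)
    (vis : PySem.Set Int) (par : PySem.Dict Int (Option Int × Int)) :
    pvBfsP g fuel (vis, par, []) = (vis, par, []) := by
  cases fuel <;> rfl

theorem pvLevel_nil (g : PySem.Dict Int (List (Int × Int))) (fuel : Nat)
    (vis : PySem.Set Int) (par : PySem.Dict Int (Option Int × Int)) :
    pvLevel g fuel vis par [] = par := by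
  cases fuel <;> rfl

theorem pvBfsP_succ_cons (g : PySem.Dict Int (List (Int × Int))) (fuel : Nat)
    (vis : PySem.Set Int) (par : PySem.Dict Int (Option Int × Int)) (u : Int) (rest : List Int) :
    pvBfsP g (fuel + 1) (vis, par, u :: rest) = pvBfsP g fuel (pvStepB g u (vis, par, rest)) := rfl

-- the inner 'for v,w in g[u]' fold of the (vis,parent,queue) state is the
-- children-forgetting projection of A's quadruple fold
theorem pvStep_proj (u : Int) (l : List (Int × Int)) :
    ∀ (vis : PySem.Set Int) (par : PySem.Dict Int (Option Int × Int))
      (ch : PySem.Dict Int (List (Int × Int))) (q : List Int),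
      l.foldl
        (fun (s : PySem.Set Int × PySem.Dict Int (Option Int × Int) × List Int) vw =>
          if PySem.Set.contains s.1 vw.1 then s
          else (PySem.Set.add s.1 vw.1, s.2.1.insert vw.1 (some u, vw.2), s.2.2 ++ [vw.1]))
        (vis, par, q) =
      (fun (s : PySem.Set Int × PySem.Dict Int (Option Int × Int) ×
                PySem.Dict Int (List (Int × Int)) × List Int) => (s.1, s.2.1, s.2.2.2))
      (l.foldl
        (fun (s : PySem.Set Int × PySem.Dict Int (Option Int × Int) ×
                  PySem.Dict Int (List (Int × Int)) × List Int) vw =>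
          if PySem.Set.contains s.1 vw.1 then s
          else (PySem.Set.add s.1 vw.1, s.2.1.insert vw.1 (some u, vw.2),
                s.2.2.1.modify u [] (· ++ [(vw.1, vw.2)]), s.2.2.2 ++ [vw.1]))
        (vis, par, ch, q)) := by
  intro vis par ch q
  induction l generalizing vis par ch q with
  | nil => rfl
  | cons vw t ih =>
    simp only [List.foldl_cons]
    by_cases h : PySem.Set.contains vis vw.1
    · rw [if_pos h, if_pos h]; exact ih vis par ch q
    · rw [if_neg h, if_neg h]; exact ih _ _ _ _

theorem pvBfs_proj (g : PySem.Dict Int (List (Int × Int))) (fuel : Nat) :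
    ∀ vis par ch q, (pvBfsP g fuel (vis, par, q)).2.1 = (pvBfsA g fuel vis par ch q).1 := by
  induction fuel with
  | zero => intro vis par ch q; rfl
  | succ fuel ih =>
    intro vis par ch q
    cases q with
    | nil => rfl
    | cons u rest =>
      simp only [pvBfsA, pvBfsP_succ_cons, pvStepB]
      rw [pvStep_proj u (g.getD u []) vis par ch rest]
      exact ih _ _ _ _

-- queue extension: the inner fold only ever APPENDS to the queue, so a prefix q
-- of the initial queue passes through unchanged
theorem pvStepFold_queue (u : Int) (l : List (Int × Int)) :
    ∀ (vis : PySem.Set Int) (par : PySem.Dict Int (Option Int × Int)) (q acc : List Int),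
      l.foldl
        (fun (s : PySem.Set Int × PySem.Dict Int (Option Int × Int) × List Int) vw =>
          if PySem.Set.contains s.1 vw.1 then s
          else (PySem.Set.add s.1 vw.1, s.2.1.insert vw.1 (some u, vw.2), s.2.2 ++ [vw.1]))
        (vis, par, q ++ acc) =
      ((l.foldl
        (fun (s : PySem.Set Int × PySem.Dict Int (Option Int × Int) × List Int) vw =>
          if PySem.Set.contains s.1 vw.1 then s
          else (PySem.Set.add s.1 vw.1, s.2.1.insert vw.1 (some u, vw.2), s.2.2 ++ [vw.1]))
        (vis, par, acc)).1,
       (l.foldl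
        (fun (s : PySem.Set Int × PySem.Dict Int (Option Int × Int) × List Int) vw =>
          if PySem.Set.contains s.1 vw.1 then s
          else (PySem.Set.add s.1 vw.1, s.2.1.insert vw.1 (some u, vw.2), s.2.2 ++ [vw.1]))
        (vis, par, acc)).2.1,
       q ++ (l.foldl
        (fun (s : PySem.Set Int × PySem.Dict Int (Option Int × Int) × List Int) vw =>
          if PySem.Set.contains s.1 vw.1 then s
          else (PySem.Set.add s.1 vw.1, s.2.1.insert vw.1 (some u, vw.2), s.2.2 ++ [vw.1]))
        (vis, par, acc)).2.2) := by
  induction l with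
  | nil => intro vis par q acc; rfl
  | cons vw t ih =>
    intro vis par q acc
    simp only [List.foldl_cons]
    by_cases h : PySem.Set.contains vis vw.1
    · rw [if_pos h, if_pos h]; exact ih vis par q acc
    · rw [if_neg h, if_neg h]
      simp only [List.append_assoc]
      exact ih _ _ q (acc ++ [vw.1])

theorem pvStepB_queue (g : PySem.Dict Int (List (Int × Int))) (u : Int)
    (vis : PySem.Set Int) (par : PySem.Dict Int (Option Int × Int)) (q acc : List Int) :
    pvStepB g u (vis, par, q ++ acc) =
      ((pvStepB g u (vis, par, acc)).1, (pvStepB g u (vis, par, acc)).2.1,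
       q ++ (pvStepB g u (vis, par, acc)).2.2) := by
  simp only [pvStepB]
  exact pvStepFold_queue u (g.getD u []) vis par q acc

-- the deque run consumes a whole frontier block L exactly as B's round fold does
theorem pvBfsP_round (g : PySem.Dict Int (List (Int × Int))) (k : Nat) :
    ∀ (L : List Int) (vis : PySem.Set Int) (par : PySem.Dict Int (Option Int × Int))
      (acc : List Int),
      pvBfsP g (L.length + k) (vis, par, L ++ acc) =
        pvBfsP g k (L.foldl (fun s u => pvStepB g u s) (vis, par, acc)) := by
  intro L
  induction L with
  | nil => intro vis par acc; simp
  | cons u L' ih =>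
    intro vis par acc
    have hlen : (u :: L').length + k = (L'.length + k) + 1 := by
      simp [List.length_cons]; omega
    rw [hlen, List.cons_append, pvBfsP_succ_cons, pvStepB_queue g u vis par L' acc]
    rw [ih]
    rfl

-- the measure: number of N-nodes not yet visited
def pvUnvis (N : List Int) (vis : PySem.Set Int) : Nat :=
  N.countP (fun n => !PySem.Set.contains vis n)

theorem pvCountP_erase (p : Int → Bool) (x : Int) :
    ∀ N : List Int, N.Nodup → x ∈ N → p x = true →
      N.countP (fun n => p n && !(n == x)) + 1 = N.countP p := by
  intro N
  induction N with
  | nil => intro _ h; cases h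
  | cons a t ih =>
    intro hnd hx hp
    rw [List.nodup_cons] at hnd
    rcases List.mem_cons.mp hx with rfl | hxt
    · simp only [List.countP_cons]
      have h1 : t.countP (fun n => p n && !(n == x)) = t.countP p := by
        apply List.countP_congr
        intro b hb
        have hba : b ≠ x := fun h => hnd.1 (h ▸ hb)
        simp [hba]
      simp [hp, h1]
    · have ha : a ≠ x := fun h => hnd.1 (h ▸ hxt)
      simp only [List.countP_cons]
      rw [← ih hnd.2 hxt hp]
      by_cases hpa : p a = true <;> simp [hpa, ha]

theorem pvUnvis_add (N : List Int) (hN : N.Nodup) (vis : PySem.Set Int) (x : Int)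
    (hx : x ∈ N) (hvx : x ∉ vis) :
    pvUnvis N (PySem.Set.add vis x) + 1 = pvUnvis N vis := by
  unfold pvUnvis
  have hcong : N.countP (fun n => !PySem.Set.contains (PySem.Set.add vis x) n)
      = N.countP (fun n => (!PySem.Set.contains vis n) && !(n == x)) := by
    apply List.countP_congr
    intro b _
    rw [PySem.Set.add_of_not_mem hvx]
    by_cases h : b = x <;> simp [h]
  rw [hcong]
  exact pvCountP_erase _ x N hN hx (by simp [hvx])

theorem pvUnvis_le (N : List Int) (vis : PySem.Set Int) : pvUnvis N vis ≤ N.length :=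
  List.countP_le_length

-- one frontier node preserves the measure queue.length + pvUnvis and Nodup of vis
theorem pvStepB_meas (g : PySem.Dict Int (List (Int × Int))) (N : List Int) (hN : N.Nodup)
    (u : Int) (hg : ∀ p ∈ g.getD u [], p.1 ∈ N) :
    ∀ (vis : PySem.Set Int) (par : PySem.Dict Int (Option Int × Int)) (q : List Int),
      vis.Nodup →
      ((pvStepB g u (vis, par, q)).1.Nodup ∧
       (pvStepB g u (vis, par, q)).2.2.length + pvUnvis N (pvStepB g u (vis, par, q)).1
         = q.length + pvUnvis N vis) := by
  simp only [pvStepB]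
  generalize hl : g.getD u [] = l at hg
  clear hl
  induction l with
  | nil => intro vis par q h; exact ⟨h, rfl⟩
  | cons vw t ih =>
    intro vis par q hvis
    simp only [List.foldl_cons]
    by_cases hv : PySem.Set.contains vis vw.1
    · rw [if_pos hv]
      exact ih (fun p hp => hg p (List.mem_cons_of_mem _ hp)) vis par q hvis
    · rw [if_neg hv]
      have hmem : vw.1 ∉ vis := fun h => hv ((PySem.Set.contains_iff _ _).mpr h)
      have hvN : vw.1 ∈ N := hg vw List.mem_cons_self
      obtain ⟨hn, hs⟩ := ih (fun p hp => hg p (List.mem_cons_of_mem _ hp))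
        (PySem.Set.add vis vw.1) (par.insert vw.1 (some u, vw.2)) (q ++ [vw.1])
        (PySem.Set.nodup_add _ _ hvis)
      refine ⟨hn, ?_⟩
      have hdec := pvUnvis_add N hN vis vw.1 hvN hmem
      rw [hs]
      simp only [List.length_append, List.length_singleton]
      omega

theorem pvRound_meas (g : PySem.Dict Int (List (Int × Int))) (N : List Int) (hN : N.Nodup)
    (hg : ∀ u p, p ∈ g.getD u [] → p.1 ∈ N) :
    ∀ (L : List Int) (vis : PySem.Set Int) (par : PySem.Dict Int (Option Int × Int))
      (q : List Int), vis.Nodup →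
      ((L.foldl (fun s u => pvStepB g u s) (vis, par, q)).1.Nodup ∧
       (L.foldl (fun s u => pvStepB g u s) (vis, par, q)).2.2.length +
         pvUnvis N (L.foldl (fun s u => pvStepB g u s) (vis, par, q)).1
         = q.length + pvUnvis N vis) := by
  intro L
  induction L with
  | nil => intro vis par q h; exact ⟨h, rfl⟩
  | cons u L ih =>
    intro vis par q hvis
    simp only [List.foldl_cons]
    obtain ⟨hn1, hs1⟩ := pvStepB_meas g N hN u (fun p hp => hg u p hp) vis par q hvis
    obtain ⟨hn2, hs2⟩ := ih (pvStepB g u (vis, par, q)).1 (pvStepB g u (vis, par, q)).2.1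
      (pvStepB g u (vis, par, q)).2.2 hn1
    refine ⟨hn2, ?_⟩
    rw [hs2, hs1]

-- main correspondence: with enough fuel on both sides, B's level BFS computes the
-- parent component of the deque BFS
theorem pvLevel_eq_pvBfsP (g : PySem.Dict Int (List (Int × Int))) (N : List Int)
    (hN : N.Nodup) (hg : ∀ u p, p ∈ g.getD u [] → p.1 ∈ N) :
    ∀ (f F : Nat) (vis : PySem.Set Int) (par : PySem.Dict Int (Option Int × Int))
      (front : List Int), vis.Nodup →
      front.length + pvUnvis N vis ≤ f → front.length + pvUnvis N vis ≤ F →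
      pvLevel g f vis par front = (pvBfsP g F (vis, par, front)).2.1 := by
  intro f
  induction f with
  | zero =>
    intro F vis par front _ hf _
    have hfront : front = [] := by
      cases front with
      | nil => rfl
      | cons a l => simp at hf
    subst hfront
    rw [pvLevel_nil, pvBfsP_nil]
  | succ f ihf =>
    intro F vis par front hvis hf hF
    cases front with
    | nil => rw [pvLevel_nil, pvBfsP_nil]
    | cons u L =>
      have hstep : pvLevel g (f + 1) vis par (u :: L) =
          pvLevel g f ((u :: L).foldl (fun s u => pvStepB g u s) (vis, par, [])).1
            ((u :: L).foldl (fun s u => pvStepB g u s) (vis, par, [])).2.1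
            ((u :: L).foldl (fun s u => pvStepB g u s) (vis, par, [])).2.2 := rfl
      obtain ⟨hrn, hrs⟩ := pvRound_meas g N hN hg (u :: L) vis par [] hvis
      simp only [List.length_nil, Nat.zero_add] at hrs
      have hlen : (u :: L).length ≤ F := by
        have := Nat.le_trans (Nat.le_add_right _ _) hF
        exact this
      have hFeq : F = (u :: L).length + (F - (u :: L).length) := by omega
      have key := pvBfsP_round g (F - (u :: L).length) (u :: L) vis par []
      rw [List.append_nil, ← hFeq] at key
      rw [hstep, key]
      have hlc : (u :: L).length = L.length + 1 := List.length_cons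
      exact ihf (F - (u :: L).length) _ _ _ hrn (by omega) (by omega)

-- The invariant carried through A's BFS.
def pvInv (N : List Int) (par : PySem.Dict Int (Option Int × Int))
    (ch : PySem.Dict Int (List (Int × Int))) (vis : PySem.Set Int) (q : List Int) : Prop :=
  par.keys = N ∧ ch.keys = N ∧ (∀ x ∈ q, x ∈ N) ∧
  (∀ v, v ∉ vis → par.getD v (none, 0) = (none, 0)) ∧
  (∀ v w k, ((v, w) ∈ ch.getD k []) ↔ par.getD v (none, 0) = (some k, w)) ∧
  (∀ k, ((ch.getD k []).map Prod.fst).Nodup)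

-- one BFS round (the inner 'for v,w in g[u]' loop) preserves the invariant
theorem pvStep_inv (N : List Int) (u : Int) (hu : u ∈ N) :
    ∀ (l : List (Int × Int)), (∀ p ∈ l, p.1 ∈ N) →
    ∀ (vis : PySem.Set Int) par ch (q : List Int), pvInv N par ch vis q →
      pvInv N
        (l.foldl
          (fun (s : PySem.Set Int × PySem.Dict Int (Option Int × Int) ×
                    PySem.Dict Int (List (Int × Int)) × List Int) vw =>
            if PySem.Set.contains s.1 vw.1 then s
            else (PySem.Set.add s.1 vw.1, s.2.1.insert vw.1 (some u, vw.2),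
                  s.2.2.1.modify u [] (· ++ [(vw.1, vw.2)]), s.2.2.2 ++ [vw.1]))
          (vis, par, ch, q)).2.1
        (l.foldl
          (fun (s : PySem.Set Int × PySem.Dict Int (Option Int × Int) ×
                    PySem.Dict Int (List (Int × Int)) × List Int) vw =>
            if PySem.Set.contains s.1 vw.1 then s
            else (PySem.Set.add s.1 vw.1, s.2.1.insert vw.1 (some u, vw.2),
                  s.2.2.1.modify u [] (· ++ [(vw.1, vw.2)]), s.2.2.2 ++ [vw.1]))
          (vis, par, ch, q)).2.2.1
        (l.foldl
          (fun (s : PySem.Set Int × PySem.Dict Int (Option Int × Int) ×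
                    PySem.Dict Int (List (Int × Int)) × List Int) vw =>
            if PySem.Set.contains s.1 vw.1 then s
            else (PySem.Set.add s.1 vw.1, s.2.1.insert vw.1 (some u, vw.2),
                  s.2.2.1.modify u [] (· ++ [(vw.1, vw.2)]), s.2.2.2 ++ [vw.1]))
          (vis, par, ch, q)).1
        (l.foldl
          (fun (s : PySem.Set Int × PySem.Dict Int (Option Int × Int) ×
                    PySem.Dict Int (List (Int × Int)) × List Int) vw =>
            if PySem.Set.contains s.1 vw.1 then s
            else (PySem.Set.add s.1 vw.1, s.2.1.insert vw.1 (some u, vw.2),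
                  s.2.2.1.modify u [] (· ++ [(vw.1, vw.2)]), s.2.2.2 ++ [vw.1]))
          (vis, par, ch, q)).2.2.2 := by
  intro l
  induction l with
  | nil => intro _ vis par ch q hinv; exact hinv
  | cons vw t ih =>
    intro hl vis par ch q hinv
    simp only [List.foldl_cons]
    by_cases hv : PySem.Set.contains vis vw.1
    · rw [if_pos hv]
      exact ih (fun p hp => hl p (List.mem_cons_of_mem _ hp)) vis par ch q hinv
    · rw [if_neg hv]
      refine ih (fun p hp => hl p (List.mem_cons_of_mem _ hp)) _ _ _ _ ?_
      obtain ⟨h1, h2, h3, h4, h5, h6⟩ := hinv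
      have hvN : vw.1 ∈ N := hl vw List.mem_cons_self
      have hvnotvis : vw.1 ∉ vis := fun hmem => hv ((PySem.Set.contains_iff _ _).mpr hmem)
      have hparv : par.getD vw.1 (none, 0) = (none, 0) := h4 _ hvnotvis
      refine ⟨?_, ?_, ?_, ?_, ?_, ?_⟩
      · rw [PySem.Dict.keys_insert_of_contains]
        · exact h1
        · rw [PySem.Dict.contains_iff_mem_keys, h1]; exact hvN
      · rw [PySem.Dict.keys_modify, PySem.Dict.keys_insert_of_contains]
        · exact h2
        · rw [PySem.Dict.contains_iff_mem_keys, h2]; exact hu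
      · intro x hx
        rcases List.mem_append.mp hx with hx | hx
        · exact h3 x hx
        · simp only [List.mem_singleton] at hx; subst hx; exact hvN
      · intro x hx
        rw [PySem.Set.mem_add, not_or] at hx
        rw [PySem.Dict.getD_insert, if_neg hx.2]
        exact h4 x hx.1
      · intro v' w' k
        rw [PySem.Dict.getD_modify, PySem.Dict.getD_insert]
        by_cases hk : k = u <;> by_cases hv' : v' = vw.1
        · subst hk; subst hv'
          rw [if_pos rfl, if_pos rfl]
          constructor
          · intro hmem
            rcases List.mem_append.mp hmem with hmem | hmem
            · exact absurd ((h5 _ _ _).mp hmem) (by rw [hparv]; simp)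
            · simp only [List.mem_singleton, Prod.mk.injEq] at hmem
              rw [hmem.2]
          · intro heq
            have : w' = vw.2 := by
              have := congrArg Prod.snd heq; simpa using this.symm
            subst this
            exact List.mem_append.mpr (Or.inr (List.mem_singleton.mpr rfl))
        · subst hk
          rw [if_pos rfl, if_neg hv']
          constructor
          · intro hmem
            rcases List.mem_append.mp hmem with hmem | hmem
            · exact (h5 _ _ _).mp hmem
            · simp only [List.mem_singleton, Prod.mk.injEq] at hmem
              exact absurd hmem.1 hv'
          · intro heq
            exact List.mem_append.mpr (Or.inl ((h5 _ _ _).mpr heq))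
        · subst hv'
          rw [if_neg hk, if_pos rfl]
          constructor
          · intro hmem
            have := (h5 _ _ _).mp hmem
            rw [hparv] at this
            exact absurd this (by simp)
          · intro heq
            simp only [Prod.mk.injEq, Option.some.injEq] at heq
            exact absurd heq.1.symm hk
        · rw [if_neg hk, if_neg hv']
          exact h5 v' w' k
      · intro k
        rw [PySem.Dict.getD_modify]
        by_cases hk : k = u
        · rw [if_pos hk, List.map_append, List.map_singleton, List.nodup_append]
          refine ⟨h6 u, List.nodup_singleton _, ?_⟩
          intro x hx y hy hxy
          rcases List.mem_map.mp hx with ⟨p, hp, hp1⟩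
          have hy' : y = vw.1 := List.mem_singleton.mp hy
          have hmem : (p.1, p.2) ∈ ch.getD u [] := by rwa [Prod.mk.eta]
          have hcontra := (h5 p.1 p.2 u).mp hmem
          rw [hp1, hxy, hy', hparv] at hcontra
          simp at hcontra
        · rw [if_neg hk]; exact h6 k

theorem pvBfsA_inv (g : PySem.Dict Int (List (Int × Int))) (N : List Int)
    (hg : ∀ u p, p ∈ g.getD u [] → p.1 ∈ N) (fuel : Nat) :
    ∀ vis par ch q, pvInv N par ch vis q →
      ∃ vis', pvInv N (pvBfsA g fuel vis par ch q).1 (pvBfsA g fuel vis par ch q).2 vis' [] := by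
  induction fuel with
  | zero =>
    intro vis par ch q hinv
    obtain ⟨h1, h2, _, h4, h5, h6⟩ := hinv
    exact ⟨vis, h1, h2, by simp, h4, h5, h6⟩
  | succ fuel ih =>
    intro vis par ch q hinv
    cases q with
    | nil =>
      obtain ⟨h1, h2, _, h4, h5, h6⟩ := hinv
      exact ⟨vis, h1, h2, by simp, h4, h5, h6⟩
    | cons u rest =>
      have hu : u ∈ N := hinv.2.2.1 u List.mem_cons_self
      have hrest : pvInv N par ch vis rest := by
        obtain ⟨h1, h2, h3, h4, h5, h6⟩ := hinv
        exact ⟨h1, h2, fun x hx => h3 x (List.mem_cons_of_mem _ hx), h4, h5, h6⟩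
      simp only [pvBfsA]
      exact ih _ _ _ _ (pvStep_inv N u hu (g.getD u []) (fun p hp => hg u p hp)
        vis par ch rest hrest)

-- generic helpers about the '{n: c for n in N}' initialisation folds
theorem pvFoldInsertConst_getD {ν : Type} (c : ν) :
    ∀ (N : List Int) (d : PySem.Dict Int ν), (∀ v, d.getD v c = c) →
      ∀ v, (N.foldl (fun d n => d.insert n c) d).getD v c = c := by
  intro N
  induction N with
  | nil => intro d h v; exact h v
  | cons n t ih =>
    intro d h v
    simp only [List.foldl_cons]
    refine ih _ (fun v' => ?_) v
    rw [PySem.Dict.getD_insert]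
    split <;> [rfl; exact h v']

theorem pvFoldInsertConst_keys {ν : Type} (c : ν) (N : List Int) (h : N.Nodup) :
    (N.foldl (fun d n => d.insert n c) PySem.Dict.empty).keys = N := by
  have := PySem.Dict.keys_foldl_insert (ν := ν) N (fun _ _ => c) PySem.Dict.empty
  simp only [PySem.Dict.keys_empty] at this
  rw [this]
  exact PySem.Set.ofList_eq_self_of_nodup N h

theorem pvInit_keys (N : List Int) (h : N.Nodup) :
    (pvInitParent N).keys = N ∧ (pvInitChildren N).keys = N :=
  ⟨pvFoldInsertConst_keys _ N h, pvFoldInsertConst_keys _ N h⟩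

theorem pvInitParent_getD (N : List Int) (v : Int) :
    (pvInitParent N).getD v (none, 0) = (none, 0) :=
  pvFoldInsertConst_getD _ N PySem.Dict.empty (fun v => PySem.Dict.getD_empty v _) v

theorem pvInitChildren_getD (N : List Int) (k : Int) :
    (pvInitChildren N).getD k [] = [] :=
  pvFoldInsertConst_getD _ N PySem.Dict.empty (fun v => PySem.Dict.getD_empty v _) k

theorem pvBuild_aux (mst : List (Int × Int × Int)) :
    ∀ (s : PySem.Dict Int (List (Int × Int)) × PySem.Set Int), s.2.Nodup →
      (∀ u p, p ∈ s.1.getD u [] → p.1 ∈ s.2) →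
      (mst.foldl (fun s e =>
        (((s.1.modify e.1 [] (· ++ [(e.2.1, e.2.2)])).modify e.2.1 [] (· ++ [(e.1, e.2.2)])),
         PySem.Set.add (PySem.Set.add s.2 e.1) e.2.1)) s).2.Nodup ∧
      (∀ u p, p ∈ (mst.foldl (fun s e =>
        (((s.1.modify e.1 [] (· ++ [(e.2.1, e.2.2)])).modify e.2.1 [] (· ++ [(e.1, e.2.2)])),
         PySem.Set.add (PySem.Set.add s.2 e.1) e.2.1)) s).1.getD u [] →
        p.1 ∈ (mst.foldl (fun s e =>
        (((s.1.modify e.1 [] (· ++ [(e.2.1, e.2.2)])).modify e.2.1 [] (· ++ [(e.1, e.2.2)])),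
         PySem.Set.add (PySem.Set.add s.2 e.1) e.2.1)) s).2) := by
  induction mst with
  | nil => intro s h1 h2; exact ⟨h1, h2⟩
  | cons e t ih =>
    intro s h1 h2
    simp only [List.foldl_cons]
    refine ih _ (PySem.Set.nodup_add _ _ (PySem.Set.nodup_add _ _ h1)) ?_
    intro u p hp
    rw [PySem.Dict.getD_modify] at hp
    have hmem : ∀ x, x ∈ s.2 → x ∈ PySem.Set.add (PySem.Set.add s.2 e.1) e.2.1 := by
      intro x hx
      rw [PySem.Set.mem_add, PySem.Set.mem_add]
      exact Or.inl (Or.inl hx)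
    have h11 : (e.1 : Int) ∈ PySem.Set.add (PySem.Set.add s.2 e.1) e.2.1 := by
      rw [PySem.Set.mem_add, PySem.Set.mem_add]; exact Or.inl (Or.inr rfl)
    have h21 : (e.2.1 : Int) ∈ PySem.Set.add (PySem.Set.add s.2 e.1) e.2.1 := by
      rw [PySem.Set.mem_add]; exact Or.inr rfl
    split at hp
    · rcases List.mem_append.mp hp with hp | hp
      · rw [PySem.Dict.getD_modify] at hp
        split at hp
        · rcases List.mem_append.mp hp with hp | hp
          · exact hmem _ (h2 _ _ hp)
          · simp only [List.mem_singleton] at hp; subst hp; exact h21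
        · exact hmem _ (h2 _ _ hp)
      · simp only [List.mem_singleton] at hp; subst hp; exact h11
    · rw [PySem.Dict.getD_modify] at hp
      split at hp
      · rcases List.mem_append.mp hp with hp | hp
        · exact hmem _ (h2 _ _ hp)
        · simp only [List.mem_singleton] at hp; subst hp; exact h21
      · exact hmem _ (h2 _ _ hp)

theorem pvBuild_nodup (mst : List (Int × Int × Int)) : (pvBuild mst).2.Nodup :=
  (pvBuild_aux mst (PySem.Dict.empty, PySem.Set.empty) List.nodup_nil
    (by intro u p hp; rw [PySem.Dict.getD_empty] at hp; cases hp)).1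

theorem pvBuild_adj (mst : List (Int × Int × Int)) :
    ∀ u p, p ∈ (pvBuild mst).1.getD u [] → p.1 ∈ (pvBuild mst).2 :=
  (pvBuild_aux mst (PySem.Dict.empty, PySem.Set.empty) List.nodup_nil
    (by intro u p hp; rw [PySem.Dict.getD_empty] at hp; cases hp)).2

-- each edge adds at most two nodes to N
theorem pvBuild_len (mst : List (Int × Int × Int)) :
    (pvBuild mst).2.length ≤ 2 * mst.length := by
  have hadd : ∀ (t : PySem.Set Int) (x : Int), (PySem.Set.add t x).length ≤ t.length + 1 := by
    intro t x
    by_cases h : x ∈ t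
    · rw [PySem.Set.add_of_mem h]; omega
    · rw [PySem.Set.add_of_not_mem h]; simp
  have haux : ∀ (l : List (Int × Int × Int))
      (s : PySem.Dict Int (List (Int × Int)) × PySem.Set Int),
      (l.foldl (fun s e =>
        (((s.1.modify e.1 [] (· ++ [(e.2.1, e.2.2)])).modify e.2.1 [] (· ++ [(e.1, e.2.2)])),
         PySem.Set.add (PySem.Set.add s.2 e.1) e.2.1)) s).2.length ≤ s.2.length + 2 * l.length := by
    intro l
    induction l with
    | nil => intro s; simp
    | cons e t ih =>
      intro s
      simp only [List.foldl_cons]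
      refine Nat.le_trans (ih _) ?_
      have h1 := hadd (PySem.Set.add s.2 e.1) e.2.1
      have h2 := hadd s.2 e.1
      simp only [List.length_cons]
      omega
  have := haux mst (PySem.Dict.empty, PySem.Set.empty)
  simpa [pvBuild] using this

-- Two lists of pairs with no duplicate first components and the same members have the
-- same sort-by-first-component.
theorem pvSorted_eq_of_same_mem (l₁ l₂ : List (Int × Int))
    (h₁ : (l₁.map Prod.fst).Nodup) (h₂ : (l₂.map Prod.fst).Nodup)
    (hm : ∀ p, p ∈ l₁ ↔ p ∈ l₂) :
    PySem.List.sorted l₁ (fun x => x.1) = PySem.List.sorted l₂ (fun x => x.1) := by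
  have hn₁ : l₁.Nodup := List.Nodup.of_map _ h₁
  have hn₂ : l₂.Nodup := List.Nodup.of_map _ h₂
  have hperm : l₂.Perm l₁ := (List.perm_ext_iff_of_nodup hn₂ hn₁).mpr (fun p => (hm p).symm)
  have hpy : (PySem.List.sorted l₂ (fun x => x.1)).Perm l₂ := PySem.List.sorted_perm l₂ _ false
  have hperm1 : (PySem.List.sorted l₂ (fun x => x.1)).Perm l₁ := hpy.trans hperm
  have hle : List.Pairwise (fun a b : Int × Int => a.1 ≤ b.1)
      (PySem.List.sorted l₂ (fun x => x.1)) := PySem.List.sorted_pairwise l₂ _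
  have hnody : ((PySem.List.sorted l₂ (fun x => x.1)).map Prod.fst).Nodup :=
    ((hpy.map Prod.fst).nodup_iff).mpr h₂
  have hne : List.Pairwise (fun a b : Int × Int => a.1 ≠ b.1)
      (PySem.List.sorted l₂ (fun x => x.1)) := List.pairwise_map.mp hnody
  have hlt : List.Pairwise (fun a b : Int × Int => a.1 < b.1)
      (PySem.List.sorted l₂ (fun x => x.1)) :=
    (hle.and hne).imp (fun h => lt_of_le_of_ne h.1 h.2)
  exact PySem.List.sorted_eq_of_perm_of_pairwise_lt l₁ _ _ hperm1 hlt

-- first components of a fst-preserving filterMap form a sublist of the input fsts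
theorem pvFilterMap_fst_sublist {α : Type} (f : (Int × α) → Option (Int × Int))
    (hf : ∀ a r, f a = some r → r.1 = a.1) :
    ∀ l : List (Int × α), ((l.filterMap f).map Prod.fst).Sublist (l.map Prod.fst) := by
  intro l
  induction l with
  | nil => simp
  | cons a t ih =>
    rcases hfa : f a with _ | r
    · rw [List.filterMap_cons_none hfa, List.map_cons]
      exact ih.cons _
    · rw [List.filterMap_cons_some hfa, List.map_cons, List.map_cons, hf a r hfa]
      exact ih.cons₂ _

-- getD after a '{n: F n for n in N}' fold
theorem pvFoldInsert_getD {ν : Type} (F : Int → ν) (dflt : ν) :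
    ∀ (N : List Int) (d : PySem.Dict Int ν) (k : Int),
      (N.foldl (fun d n => d.insert n (F n)) d).getD k dflt =
        if k ∈ N then F k else d.getD k dflt := by
  intro N
  induction N with
  | nil => intro d k; simp
  | cons n t ih =>
    intro d k
    simp only [List.foldl_cons]
    rw [ih]
    by_cases hkt : k ∈ t
    · rw [if_pos hkt, if_pos (List.mem_cons_of_mem _ hkt)]
    · rw [if_neg hkt, PySem.Dict.getD_insert]
      by_cases hkn : k = n
      · subst hkn; rw [if_pos rfl, if_pos List.mem_cons_self]
      · rw [if_neg hkn, if_neg (by simp [hkn, hkt])]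

-- B's per-key children list agrees with A's after the sort
theorem pvChildValue (N : List Int) (hN : N.Nodup)
    (parA : PySem.Dict Int (Option Int × Int)) (chA : PySem.Dict Int (List (Int × Int)))
    (hA1 : parA.keys = N)
    (hA5 : ∀ v w k, ((v, w) ∈ chA.getD k []) ↔ parA.getD v (none, 0) = (some k, w))
    (hA6 : ∀ k, ((chA.getD k []).map Prod.fst).Nodup) (n : Int) :
    PySem.List.sorted (chA.getD n []) (fun x => x.1) =
      PySem.List.sorted
        (parA.items.filterMap (fun it =>
          if it.2.1 == some n then some (it.1, it.2.2) else none))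
        (fun x => x.1) := by
  have hknd : parA.keys.Nodup := by rw [hA1]; exact hN
  refine pvSorted_eq_of_same_mem _ _ (hA6 n) ?_ ?_
  · have hsub := pvFilterMap_fst_sublist
      (fun it : Int × (Option Int × Int) =>
        if it.2.1 == some n then some (it.1, it.2.2) else none)
      (by
        intro a r hfa
        simp only at hfa
        split at hfa
        · cases hfa; rfl
        · cases hfa)
      parA.items
    exact hsub.nodup hknd
  · intro p
    constructor
    · intro hp
      have hpar := (hA5 p.1 p.2 n).mp (by rwa [Prod.mk.eta])
      have hc : parA.contains p.1 = true := by
        by_contra hc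
        rw [PySem.Dict.getD_of_not_contains _ _ (by simpa using hc)] at hpar
        simp at hpar
      have hmemit : (p.1, (some n, p.2)) ∈ parA.items := by
        rw [PySem.Dict.items_eq_map_keys parA hknd ((none : Option Int), (0 : Int))]
        refine List.mem_map.mpr ⟨p.1, (PySem.Dict.contains_iff_mem_keys _ _).mp hc, ?_⟩
        rw [hpar]
      refine List.mem_filterMap.mpr ⟨(p.1, (some n, p.2)), hmemit, ?_⟩
      simp only
      rw [if_pos (beq_self_eq_true _), Prod.mk.eta]
    · intro hp
      rcases List.mem_filterMap.mp hp with ⟨a, ha, hfa⟩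
      split at hfa
      · rename_i hcond
        cases hfa
        have haeq : a.2.1 = some n := by simpa using hcond
        have ha' : (a.1, a.2) ∈ parA.items := by rw [Prod.mk.eta]; exact ha
        have : parA.getD a.1 (none, 0) = a.2 :=
          PySem.Dict.getD_of_mem_items _ ha' hknd (none, 0)
        refine (hA5 a.1 a.2.2 n).mpr ?_
        rw [this, ← haeq]
      · cases hfa

-- the initial state of A's BFS satisfies the invariant
theorem pvInv_init (N : List Int) (hN : N.Nodup) (raiz : Int) (hr : raiz ∈ N) :
    pvInv N (pvInitParent N) (pvInitChildren N) (PySem.Set.add PySem.Set.empty raiz) [raiz] := by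
  refine ⟨(pvInit_keys N hN).1, (pvInit_keys N hN).2, ?_, ?_, ?_, ?_⟩
  · intro x hx
    rw [List.mem_singleton] at hx
    subst hx; exact hr
  · intro v _; exact pvInitParent_getD N v
  · intro v w k
    rw [pvInitChildren_getD, pvInitParent_getD]
    simp
  · intro k
    rw [pvInitChildren_getD]
    exact List.nodup_nil

-- else branch: A's children dict is {n: [] for n in N} plus the raiz default
theorem pvElseA (N : List Int) (hN : N.Nodup) (raiz : Int) (hnr : raiz ∉ N) :
    (pvSortVals ((pvInitChildren N).setdefault raiz [])).items
      = (N ++ [raiz]).map (fun n => (n, ([] : List (Int × Int)))) := by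
  have hkc : (pvInitChildren N).keys = N := (pvInit_keys N hN).2
  have hc : (pvInitChildren N).contains raiz = false := by
    rw [Bool.eq_false_iff]
    intro h
    have hm := (PySem.Dict.contains_iff_mem_keys _ _).mp h
    rw [hkc] at hm
    exact hnr hm
  rw [PySem.Dict.setdefault_of_not_contains _ _ hc]
  show (((pvInitChildren N).insert raiz []).items.map
      (fun p => (p.1, PySem.List.sorted p.2 (fun x => x.1)))) = _
  rw [PySem.Dict.items_insert, hc]
  simp only [Bool.false_eq_true, if_false]
  rw [PySem.Dict.items_eq_map_keys _ (by rw [hkc]; exact hN) ([] : List (Int × Int)), hkc]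
  rw [List.map_append, List.map_append, List.map_map]
  congr 1
  · apply List.map_congr_left
    intro n _
    simp only [Function.comp_apply]
    rw [pvInitChildren_getD]
    simp [PySem.List.sorted_eq_nil_iff]

-- else branch: every parent value is (None, 0), so B's comprehension yields []
theorem pvElseB (N : List Int) (hN : N.Nodup) (raiz : Int) (hnr : raiz ∉ N) :
    (pvChildrenOf ((pvInitParent N).insert raiz (none, 0)) (PySem.Set.add N raiz)).items
      = (N ++ [raiz]).map (fun n => (n, ([] : List (Int × Int)))) := by
  have hNadd : PySem.Set.add N raiz = N ++ [raiz] := PySem.Set.add_of_not_mem hnr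
  have hN' : (N ++ [raiz]).Nodup := by
    rw [List.nodup_append]
    refine ⟨hN, List.nodup_singleton _, ?_⟩
    intro a ha b hb
    rw [List.mem_singleton] at hb
    subst hb
    exact fun h => hnr (h ▸ ha)
  have hkp : (pvInitParent N).keys = N := (pvInit_keys N hN).1
  have hcp : (pvInitParent N).contains raiz = false := by
    rw [Bool.eq_false_iff]
    intro h
    have hm := (PySem.Dict.contains_iff_mem_keys _ _).mp h
    rw [hkp] at hm
    exact hnr hm
  have hitems : ((pvInitParent N).insert raiz (none, 0)).items
      = (N ++ [raiz]).map (fun n => (n, ((none : Option Int), (0 : Int)))) := by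
    rw [PySem.Dict.items_insert, hcp]
    simp only [Bool.false_eq_true, if_false]
    rw [PySem.Dict.items_eq_map_keys _ (by rw [hkp]; exact hN)
      ((none : Option Int), (0 : Int)), hkp, List.map_append]
    congr 1
    apply List.map_congr_left
    intro n _
    rw [pvInitParent_getD]
  have hfm : ∀ n : Int, (((pvInitParent N).insert raiz (none, 0)).items.filterMap
      (fun it => if it.2.1 == some n then some (it.1, it.2.2) else none)) = [] := by
    intro n
    rw [hitems, List.filterMap_eq_nil_iff]
    intro a ha
    rcases List.mem_map.mp ha with ⟨x, -, rfl⟩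
    rfl
  have hkeys : (pvChildrenOf ((pvInitParent N).insert raiz (none, 0))
      (PySem.Set.add N raiz)).keys = N ++ [raiz] := by
    unfold pvChildrenOf
    rw [PySem.Dict.keys_foldl_insert, PySem.Dict.keys_empty, PySem.Set.update_nil_left,
      hNadd]
    exact PySem.Set.ofList_eq_self_of_nodup _ hN'
  rw [PySem.Dict.items_eq_map_keys _ (by rw [hkeys]; exact hN') ([] : List (Int × Int)), hkeys]
  apply List.map_congr_left
  intro n hn
  have : (pvChildrenOf ((pvInitParent N).insert raiz (none, 0))
      (PySem.Set.add N raiz)).getD n [] = [] := by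
    unfold pvChildrenOf
    rw [hNadd, pvFoldInsert_getD, if_pos hn, hfm n]
    simp [PySem.List.sorted_eq_nil_iff]
  rw [this]


-- ===== VERDICT (by name: the statement is the Claim_ definition above) =====
theorem enraizar_mst_spec : Claim_equal_enraizar_mst := by
  intro mst raiz _
  unfold Spec_enraizar_mst
  by_cases hr : PySem.Set.contains (pvBuild mst).2 raiz = true
  · simp only [enraizar_mst, enraizar_mst_alt, hr, if_true]
    have hN : (pvBuild mst).2.Nodup := pvBuild_nodup mst
    have hg := pvBuild_adj mst
    have hrmem : raiz ∈ (pvBuild mst).2 := (PySem.Set.contains_iff _ _).mp hr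
    have hvis0 : (PySem.Set.add PySem.Set.empty raiz).Nodup :=
      PySem.Set.nodup_add _ _ List.nodup_nil
    have hpot : [raiz].length + pvUnvis (pvBuild mst).2 (PySem.Set.add PySem.Set.empty raiz)
        ≤ 2 * mst.length + 1 := by
      have h1 := pvUnvis_le (pvBuild mst).2 (PySem.Set.add PySem.Set.empty raiz)
      have h2 := pvBuild_len mst
      simp only [List.length_singleton]
      omega
    have hpar : pvLevel (pvBuild mst).1 (2 * mst.length + 1)
        (PySem.Set.add PySem.Set.empty raiz) (pvInitParent (pvBuild mst).2) [raiz]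
        = (pvBfsA (pvBuild mst).1 (2 * mst.length + 1) (PySem.Set.add PySem.Set.empty raiz)
            (pvInitParent (pvBuild mst).2) (pvInitChildren (pvBuild mst).2) [raiz]).1 := by
      rw [pvLevel_eq_pvBfsP (pvBuild mst).1 (pvBuild mst).2 hN hg (2 * mst.length + 1)
        (2 * mst.length + 1) _ _ _ hvis0 hpot hpot]
      exact pvBfs_proj _ _ _ _ _ _
    rw [hpar]
    set parA := (pvBfsA (pvBuild mst).1 (2 * mst.length + 1)
      (PySem.Set.add PySem.Set.empty raiz) (pvInitParent (pvBuild mst).2)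
      (pvInitChildren (pvBuild mst).2) [raiz]).1 with hparA
    set chA := (pvBfsA (pvBuild mst).1 (2 * mst.length + 1)
      (PySem.Set.add PySem.Set.empty raiz) (pvInitParent (pvBuild mst).2)
      (pvInitChildren (pvBuild mst).2) [raiz]).2 with hchA
    obtain ⟨vis', hA1, hA2, -, hA4, hA5, hA6⟩ :=
      pvBfsA_inv (pvBuild mst).1 (pvBuild mst).2 hg (2 * mst.length + 1)
        (PySem.Set.add PySem.Set.empty raiz) (pvInitParent (pvBuild mst).2)
        (pvInitChildren (pvBuild mst).2) [raiz]
        (pvInv_init (pvBuild mst).2 hN raiz hrmem)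
    rw [← hparA] at hA1 hA4 hA5
    rw [← hchA] at hA2 hA5 hA6
    refine Prod.ext rfl (Prod.ext ?_ rfl)
    -- children components
    have hkeysB : (pvChildrenOf parA (pvBuild mst).2).keys = (pvBuild mst).2 := by
      unfold pvChildrenOf
      rw [PySem.Dict.keys_foldl_insert, PySem.Dict.keys_empty, PySem.Set.update_nil_left]
      exact PySem.Set.ofList_eq_self_of_nodup _ hN
    show (pvSortVals chA).items = (pvChildrenOf parA (pvBuild mst).2).items
    show chA.items.map (fun p => (p.1, PySem.List.sorted p.2 (fun x => x.1))) = _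
    rw [PySem.Dict.items_eq_map_keys chA (by rw [hA2]; exact hN) ([] : List (Int × Int)), hA2]
    rw [PySem.Dict.items_eq_map_keys _ (by rw [hkeysB]; exact hN) ([] : List (Int × Int)),
      hkeysB, List.map_map]
    apply List.map_congr_left
    intro n hn
    simp only [Function.comp_apply]
    have hB : (pvChildrenOf parA (pvBuild mst).2).getD n [] =
        PySem.List.sorted
          (parA.items.filterMap (fun it =>
            if it.2.1 == some n then some (it.1, it.2.2) else none))
          (fun x => x.1) := by
      unfold pvChildrenOf
      rw [pvFoldInsert_getD, if_pos hn]
    rw [hB, pvChildValue (pvBuild mst).2 hN parA chA hA1 hA5 hA6 n]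
  · have hrb : PySem.Set.contains (pvBuild mst).2 raiz = false := by
      simpa using hr
    have hnr : raiz ∉ (pvBuild mst).2 := fun h => hr ((PySem.Set.contains_iff _ _).mpr h)
    simp only [enraizar_mst, enraizar_mst_alt, hrb, Bool.false_eq_true, if_false]
    refine Prod.ext rfl (Prod.ext ?_ rfl)
    show (pvSortVals ((pvInitChildren (pvBuild mst).2).setdefault raiz [])).items
        = (pvChildrenOf ((pvInitParent (pvBuild mst).2).insert raiz (none, 0))
            (PySem.Set.add (pvBuild mst).2 raiz)).items
    rw [pvElseA (pvBuild mst).2 (pvBuild_nodup mst) raiz hnr,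
      pvElseB (pvBuild mst).2 (pvBuild_nodup mst) raiz hnr]
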